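-- pv_equiv track=rewrite | github.com/birdlab-tech/building-analytics | filter_points.py | apply_blockers
-- ===== SOURCE A (Python) =====
-- import fnmatch
--
-- def match_wildcard(point_name, pattern, invert=False):
--     """
--     Match point name against wildcard pattern.
--     Supports * (any characters) and ? (single character)
--     """
--     if not pattern or pattern.strip() == '':
--         return True  # Blank patterns are ignored
--
--     # fnmatch for Unix-style wildcards
--     matches = fnmatch.fnmatch(point_name, pattern)
--
--     return not matches if invert else matches
--
-- def apply_blockers(points, blocker_rows):
--     """
--     Apply blocker filters (AND logic - all must pass).
--     A point passes if it does NOT match the blocker (i.e., blockers REMOVE matching points).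
--     """
--     filtered = points.copy()
--
--     for blocker in blocker_rows:
--         pattern = blocker.get('pattern', '').strip()
--         invert = blocker.get('invert', False)
--
--         if pattern:  # Only apply non-empty patterns
--             # Remove points that match the blocker (keep points that DON'T match)
--             filtered = [p for p in filtered if not match_wildcard(p, pattern, invert)]
--
--     return filtered
-- ===== SOURCE B (Python) =====
-- def _match_nfa(name, pattern):
--     """Wildcard match ('*' = any sequence, '?' = any single character, everything
--     else literal) by simulating an NFA over pattern positions: one left-to-right
--     pass over the name, no backtracking."""
--     n = len(pattern)
--
--     def close(states):
--         # follow '*' transitions that consume no character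
--         out = set()
--         stack = list(states)
--         while stack:
--             i = stack.pop()
--             if i in out:
--                 continue
--             out.add(i)
--             if i < n and pattern[i] == '*':
--                 stack.append(i + 1)
--         return out
--
--     states = close({0})
--     for c in name:
--         nxt = set()
--         for i in states:
--             if i < n:
--                 if pattern[i] == '*':
--                     nxt.add(i)
--                 elif pattern[i] == '?' or pattern[i] == c:
--                     nxt.add(i + 1)
--         states = close(nxt)
--     return n in states
--
--
-- def match_wildcard(point_name, pattern, invert=False):
--     """
--     Match point name against wildcard pattern.
--     Supports * (any characters) and ? (single character)
--     """
--     if not pattern or pattern.strip() == '':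
--         return True  # Blank patterns are ignored
--
--     matches = _match_nfa(point_name, pattern)
--
--     return not matches if invert else matches
--
--
-- def apply_blockers(points, blocker_rows):
--     """
--     Apply blocker filters (AND logic - all must pass).
--     A point passes if it does NOT match any blocker.
--
--     Single pass: collect the active (pattern, invert) pairs once, then keep
--     each point iff no active blocker matches it.
--     """
--     pairs = [(b.get('pattern', '').strip(), b.get('invert', False)) for b in blocker_rows]
--     active = [(pat, inv) for pat, inv in pairs if pat]
--     return [p for p in points
--             if not any(match_wildcard(p, pat, inv) for pat, inv in active)]
-- ===== Notes on version B (the rewrite author's own statement) =====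
-- stated objective: alternative
-- what changed: A rebuilds a shrinking copy of the point list once per blocker and matches via fnmatch's backtracking regex; B precomputes the active (pattern, invert) pairs, implements the documented '*'/'?' wildcard match itself as a linear NFA state-set simulation, and makes one pass over the points keeping each point iff no active blocker matches it. Pre_ excludes inputs where a blocker's stripped pattern contains '[', because there A's fnmatch additionally interprets '[...]' character classes while B supports exactly the module's documented '*'/'?' wildcards and treats '[' as a literal.
-- outside the precondition, e.g. on apply_blockers(['a'], [{'pattern': '[ab]', 'invert': ''}]): A returns [], B returns ['a']
import Mathlib
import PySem

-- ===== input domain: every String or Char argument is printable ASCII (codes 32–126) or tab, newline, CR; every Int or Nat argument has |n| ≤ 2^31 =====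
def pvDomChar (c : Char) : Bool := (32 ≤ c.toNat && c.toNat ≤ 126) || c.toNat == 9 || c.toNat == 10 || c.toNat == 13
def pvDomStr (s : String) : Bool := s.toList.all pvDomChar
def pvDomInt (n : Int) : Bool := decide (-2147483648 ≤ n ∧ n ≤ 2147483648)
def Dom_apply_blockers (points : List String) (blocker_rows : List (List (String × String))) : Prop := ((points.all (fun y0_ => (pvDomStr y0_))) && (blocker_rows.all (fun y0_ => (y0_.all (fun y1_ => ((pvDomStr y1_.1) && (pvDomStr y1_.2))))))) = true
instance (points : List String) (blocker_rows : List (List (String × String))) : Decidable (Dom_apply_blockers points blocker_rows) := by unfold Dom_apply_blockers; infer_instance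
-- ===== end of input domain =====

-- B replaces A's per-blocker rebuilding of a shrinking list by precomputing the active
-- (pattern, invert) pairs and one pass over the points (objective: simpler, same output on Pre_).

-- Python truthiness of dict.get('invert', False): absent → false, a string → non-empty
def truthyOpt : Option String → Bool
  | some s => s != ""
  | none => false

-- ===== PORT A =====
-- A calls stdlib fnmatch.fnmatch; fnA is its hand port for '*'/'?'/literal patterns
-- (exact on Pre_, which excludes '[' in patterns): the usual backtracking recursion,
-- matching fnmatch's translate-to-regex semantics.
def fnA : List Char → List Char → Bool
  | [], [] => true
  | [], _ :: _ => false
  | t :: ts, [] => if t = '*' then fnA ts [] else false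
  | t :: ts, c :: s =>
    if t = '*' then fnA ts (c :: s) || fnA (t :: ts) s
    else if t = '?' ∨ t = c then fnA ts s
    else false
termination_by ts s => (s.length, ts.length)
decreasing_by all_goals (simp_wf; omega)

-- the module's match_wildcard helper as A uses it
def match_wildcard_A (point_name pattern : String) (invert : Bool) : Bool :=
  if pattern = "" || PySem.Str.strip pattern = "" then true
  else
    let m0 := fnA pattern.toList point_name.toList
    if invert then !m0 else m0

def apply_blockers (points : List String) (blocker_rows : List (List (String × String))) : List String :=
  blocker_rows.foldl
    (fun filtered blocker =>
      let pattern := PySem.Str.strip ((PySem.Dict.mk blocker).getD "pattern" "")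
      let invert := truthyOpt ((PySem.Dict.mk blocker).get? "invert")
      if pattern != "" then filtered.filter (fun p => !(match_wildcard_A p pattern invert))
      else filtered)
    points

-- ===== PORT B =====
-- Source B implements the '*'/'?' wildcard match itself (_match_nfa): an NFA state-set
-- simulation folded once over the name; this is its port, with the integer pattern
-- positions of Source B represented as the corresponding pattern suffixes.

-- epsilon closure of a pattern suffix: skip any leading run of '*'
def cl : List Char → List (List Char)
  | [] => [[]]
  | t :: ts => if t = '*' then (t :: ts) :: cl ts else [t :: ts]

-- successors of one state on input character c
def succB (c : Char) : List Char → List (List Char)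
  | [] => []
  | t :: ts =>
    if t = '*' then cl (t :: ts)
    else if t = '?' ∨ t = c then cl ts
    else []

def stepB (c : Char) (S : List (List Char)) : List (List Char) :=
  (S.flatMap (succB c)).dedup

def fnB (name pat : String) : Bool :=
  (name.toList.foldl (fun S c => stepB c S) (cl pat.toList)).contains []

-- the module's match_wildcard helper as B uses it
def match_wildcard_B (point_name pattern : String) (invert : Bool) : Bool :=
  if pattern = "" || PySem.Str.strip pattern = "" then true
  else
    let m0 := fnB point_name pattern
    if invert then !m0 else m0

def apply_blockers_alt (points : List String) (blocker_rows : List (List (String × String))) : List String :=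
  let pairs := blocker_rows.map (fun b =>
      (PySem.Str.strip ((PySem.Dict.mk b).getD "pattern" ""),
       truthyOpt ((PySem.Dict.mk b).get? "invert")))
  let active := pairs.filter (fun q => q.1 != "")
  points.filter (fun p => !(active.any (fun q => match_wildcard_B p q.1 q.2)))

-- ===== PRECONDITION & SPEC =====
-- Pre_ excludes inputs where some blocker's stripped pattern contains '[': there A's
-- fnmatch additionally interprets '[...]' character classes, while B supports exactly
-- the module's documented '*'/'?' wildcards and treats '[' as a literal character.
def Pre_apply_blockers (points : List String) (blocker_rows : List (List (String × String))) : Prop :=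
  ∀ b ∈ blocker_rows, ¬ ('[' ∈ (PySem.Str.strip ((PySem.Dict.mk b).getD "pattern" "")).toList)
instance (points : List String) (blocker_rows : List (List (String × String))) : Decidable (Pre_apply_blockers points blocker_rows) := by unfold Pre_apply_blockers; infer_instance

def pvWitness_apply_blockers : List String × (List (List (String × String))) :=
  (["foo", "bar", "baz"], [[("pattern", "b*"), ("invert", "")], [("pattern", "?a?")]])

def Spec_apply_blockers (points : List String) (blocker_rows : List (List (String × String))) (out : List String) : Prop := out = apply_blockers_alt points blocker_rows
instance (points : List String) (blocker_rows : List (List (String × String))) (out : List String) : Decidable (Spec_apply_blockers points blocker_rows out) := by unfold Spec_apply_blockers; infer_instance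

-- ===== CLAIM (what is proved, stated in full; the proofs are below) =====
def Claim_equal_apply_blockers : Prop := ∀ (points : List String) (blocker_rows : List (List (String × String))), Dom_apply_blockers points blocker_rows → Pre_apply_blockers points blocker_rows → Spec_apply_blockers points blocker_rows (apply_blockers points blocker_rows)

-- ===== LEMMAS AND PROOFS =====

-- unfolding equations
theorem cl_star (ts : List Char) : cl ('*' :: ts) = ('*' :: ts) :: cl ts := by simp [cl]
theorem cl_nonstar {t : Char} (h : t ≠ '*') (ts : List Char) : cl (t :: ts) = [t :: ts] := by
  simp [cl, h]
theorem fnA_star_nil (ts : List Char) : fnA ('*' :: ts) [] = fnA ts [] := by simp [fnA]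
theorem fnA_star_cons (ts : List Char) (c : Char) (s : List Char) :
    fnA ('*' :: ts) (c :: s) = (fnA ts (c :: s) || fnA ('*' :: ts) s) := by simp [fnA]
theorem fnA_nonstar_cons {t : Char} (h : t ≠ '*') (ts : List Char) (c : Char) (s : List Char) :
    fnA (t :: ts) (c :: s) = if t = '?' ∨ t = c then fnA ts s else false := by
  simp [fnA, h]
theorem succB_star (c : Char) (ts : List Char) : succB c ('*' :: ts) = cl ('*' :: ts) := by
  simp [succB]
theorem succB_nonstar {t : Char} (h : t ≠ '*') (c : Char) (ts : List Char) :
    succB c (t :: ts) = if t = '?' ∨ t = c then cl ts else [] := by simp [succB, h]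

-- every suffix is in its own closure
theorem mem_cl_self (u : List Char) : u ∈ cl u := by
  cases u with
  | nil => simp [cl]
  | cons t ts =>
    by_cases h : t = '*'
    · subst h; rw [cl_star]; exact List.mem_cons_self
    · rw [cl_nonstar h]; exact List.mem_cons_self

-- closures are transitively closed
theorem cl_trans {u v : List Char} (hv : v ∈ cl u) : ∀ w ∈ cl v, w ∈ cl u := by
  induction u with
  | nil => simp [cl] at hv; subst hv; simp
  | cons t ts ih =>
    by_cases h : t = '*'
    · subst h
      rw [cl_star] at hv ⊢
      rcases List.mem_cons.mp hv with hv | hv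
      · subst hv; intro w hw; exact hw
      · intro w hw; exact List.mem_cons_of_mem _ (ih hv w hw)
    · rw [cl_nonstar h] at hv
      simp at hv; subst hv; intro w hw; exact hw

def ClosedS (S : List (List Char)) : Prop := ∀ st ∈ S, ∀ v ∈ cl st, v ∈ S

theorem closed_cl (u : List Char) : ClosedS (cl u) := fun _ hst v hv => cl_trans hst v hv

-- a star can match zero characters
theorem fnA_star_weaken {ts s : List Char} (h : fnA ts s = true) : fnA ('*' :: ts) s = true := by
  cases s with
  | nil => rw [fnA_star_nil]; exact h
  | cons c s' => rw [fnA_star_cons, h, Bool.true_or]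

-- the closure decides exactly what its head decides
theorem cl_any (u s : List Char) : (cl u).any (fun st => fnA st s) = fnA u s := by
  induction u with
  | nil => simp [cl]
  | cons t ts ih =>
    by_cases h : t = '*'
    · subst h
      rw [cl_star, List.any_cons, ih]
      cases hts : fnA ts s with
      | false => simp
      | true => simp [fnA_star_weaken hts]
    · rw [cl_nonstar h]; simp

-- if a pattern suffix accepts the empty string, the empty suffix is in its closure
theorem nil_mem_cl {st : List Char} (h : fnA st [] = true) : [] ∈ cl st := by
  induction st with
  | nil => simp [cl]
  | cons t ts ih =>
    by_cases ht : t = '*'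
    · subst ht
      rw [fnA_star_nil] at h
      rw [cl_star]
      exact List.mem_cons_of_mem _ (ih h)
    · simp [fnA, ht] at h

theorem any_dedup {α : Type} [DecidableEq α] (l : List α) (p : α → Bool) :
    (l.dedup).any p = l.any p := by
  cases h : l.any p with
  | true =>
    rw [List.any_eq_true] at h; obtain ⟨x, hx, hp⟩ := h
    exact List.any_eq_true.mpr ⟨x, List.mem_dedup.mpr hx, hp⟩
  | false =>
    rw [List.any_eq_false] at h ⊢
    intro x hx; exact h x (List.mem_dedup.mp hx)

theorem closed_stepB (c : Char) (S : List (List Char)) : ClosedS (stepB c S) := by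
  intro st hst v hv
  unfold stepB at hst ⊢
  rw [List.mem_dedup] at hst ⊢
  rw [List.mem_flatMap] at hst ⊢
  obtain ⟨u, hu, hsu⟩ := hst
  refine ⟨u, hu, ?_⟩
  cases u with
  | nil => simp [succB] at hsu
  | cons t ts =>
    by_cases ht : t = '*'
    · subst ht
      rw [succB_star] at hsu ⊢
      exact cl_trans hsu v hv
    · rw [succB_nonstar ht] at hsu ⊢
      by_cases hm : t = '?' ∨ t = c
      · rw [if_pos hm] at hsu ⊢
        exact cl_trans hsu v hv
      · rw [if_neg hm] at hsu; simp at hsu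

-- forward completeness of one NFA step, by structural induction on the state
theorem stepB_complete (c : Char) (s' : List Char) (S : List (List Char)) (hS : ClosedS S) :
    ∀ st ∈ S, fnA st (c :: s') = true →
      S.any (fun u => (succB c u).any (fun v => fnA v s')) = true := by
  intro st hst h
  induction st with
  | nil => simp [fnA] at h
  | cons t ts ih =>
    by_cases ht : t = '*'
    · subst ht
      rw [fnA_star_cons, Bool.or_eq_true] at h
      rcases h with h | h
      · have hts : ts ∈ S := hS _ hst ts (by rw [cl_star]; exact List.mem_cons_of_mem _ (mem_cl_self ts))
        exact ih hts h
      · refine List.any_eq_true.mpr ⟨_, hst, ?_⟩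
        rw [succB_star, cl_any]
        exact h
    · refine List.any_eq_true.mpr ⟨_, hst, ?_⟩
      rw [fnA_nonstar_cons ht] at h
      rw [succB_nonstar ht]
      by_cases hm : t = '?' ∨ t = c
      · rw [if_pos hm] at h
        rw [if_pos hm, cl_any]
        exact h
      · rw [if_neg hm] at h; exact absurd h (by simp)

-- one NFA step is exact
theorem stepB_exact (c : Char) (s' : List Char) (S : List (List Char)) (hS : ClosedS S) :
    (stepB c S).any (fun st => fnA st s') = S.any (fun st => fnA st (c :: s')) := by
  unfold stepB
  rw [any_dedup, List.any_flatMap]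
  cases hr : S.any (fun st => fnA st (c :: s')) with
  | true =>
    rw [List.any_eq_true] at hr; obtain ⟨st, hst, h⟩ := hr
    exact stepB_complete c s' S hS st hst h
  | false =>
    rw [List.any_eq_false] at hr
    rw [List.any_eq_false]
    intro st hst
    have h := hr st hst
    cases st with
    | nil => simp [succB]
    | cons t ts =>
      by_cases ht : t = '*'
      · subst ht
        rw [fnA_star_cons] at h
        rw [succB_star, cl_any]
        intro hc
        exact h (by rw [hc, Bool.or_true])
      · rw [fnA_nonstar_cons ht] at h
        rw [succB_nonstar ht]
        by_cases hm : t = '?' ∨ t = c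
        · rw [if_pos hm] at h
          rw [if_pos hm, cl_any]
          simpa using h
        · rw [if_neg hm]; simp

-- the folded NFA simulation is exact
theorem foldl_stepB (s : List Char) : ∀ S, ClosedS S →
    ((s.foldl (fun S c => stepB c S) S).contains []) = S.any (fun st => fnA st s) := by
  induction s with
  | nil =>
    intro S hS
    simp only [List.foldl_nil]
    cases h : S.any (fun st => fnA st []) with
    | true =>
      rw [List.any_eq_true] at h; obtain ⟨st, hst, hm⟩ := h
      have : ([] : List Char) ∈ S := hS st hst [] (nil_mem_cl hm)
      simp [List.contains_eq_mem, this]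
    | false =>
      rw [List.any_eq_false] at h
      simp only [List.contains_eq_mem, decide_eq_false_iff_not]
      intro hmem
      have := h [] hmem
      simp [fnA] at this
  | cons c s' ih =>
    intro S hS
    simp only [List.foldl_cons]
    rw [ih (stepB c S) (closed_stepB c S), stepB_exact c s' S hS]

-- the two fnmatch ports agree
theorem fnB_eq_fnA (name pat : String) : fnB name pat = fnA pat.toList name.toList := by
  unfold fnB
  rw [foldl_stepB name.toList (cl pat.toList) (closed_cl pat.toList), cl_any]

theorem mw_eq (p pat : String) (inv : Bool) :
    match_wildcard_B p pat inv = match_wildcard_A p pat inv := by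
  unfold match_wildcard_A match_wildcard_B
  rw [fnB_eq_fnA]

-- the (pattern, invert) extraction both ports perform
def patOf (b : List (String × String)) : String :=
  PySem.Str.strip ((PySem.Dict.mk b).getD "pattern" "")
def invOf (b : List (String × String)) : Bool :=
  truthyOpt ((PySem.Dict.mk b).get? "invert")

-- "this blocker removes p"
def blocks (b : List (String × String)) (p : String) : Bool :=
  (patOf b != "") && match_wildcard_A p (patOf b) (invOf b)

theorem stepA_eq_filter (acc : List String) (b : List (String × String)) :
    (if patOf b != "" then
        acc.filter (fun p => !(match_wildcard_A p (patOf b) (invOf b)))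
      else acc)
    = acc.filter (fun p => !blocks b p) := by
  cases h : patOf b != "" with
  | false => simp [h, blocks]
  | true => simp [h, blocks]

theorem apply_blockers_eq_filter (bs : List (List (String × String))) (xs : List String) :
    apply_blockers xs bs = xs.filter (fun p => bs.all (fun b => !blocks b p)) := by
  induction bs generalizing xs with
  | nil => simp [apply_blockers]
  | cons b bs ih =>
    show apply_blockers
        (if patOf b != "" then
          xs.filter (fun p => !(match_wildcard_A p (patOf b) (invOf b))) else xs) bs = _
    rw [stepA_eq_filter, ih, List.filter_filter]
    refine List.filter_congr ?_
    intro p _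
    simp [Bool.and_comm]

theorem apply_blockers_alt_eq_filter (bs : List (List (String × String))) (xs : List String) :
    apply_blockers_alt xs bs = xs.filter (fun p => !(bs.any (fun b => blocks b p))) := by
  unfold apply_blockers_alt
  refine List.filter_congr ?_
  intro p _
  have h : (((bs.map (fun b =>
          (PySem.Str.strip ((PySem.Dict.mk b).getD "pattern" ""),
           truthyOpt ((PySem.Dict.mk b).get? "invert")))).filter
        (fun q => q.1 != "")).any (fun q => match_wildcard_B p q.1 q.2))
      = bs.any (fun b => blocks b p) := by
    rw [List.any_filter, List.any_map]
    congr 1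
    funext b
    simp [blocks, patOf, invOf, mw_eq, Function.comp]
  rw [h]

-- ===== VERDICT (by name: the statement is the Claim_ definition above) =====
theorem apply_blockers_spec : Claim_equal_apply_blockers := by
  intro points blocker_rows _ _
  unfold Spec_apply_blockers
  rw [apply_blockers_eq_filter, apply_blockers_alt_eq_filter]
  refine List.filter_congr ?_
  intro p _
  rw [List.any_eq_not_all_not]
  simp
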